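-- pv_equiv track=rewrite | github.com/SophiaHeh/CS61A | discussion/disc_6/disc_6.py | add_this_many
-- ===== SOURCE A (Python) =====
-- def add_this_many(x, el, s):
--     """ Adds el to the end of s the number of times x occurs
--     in s.
--     >>> s = [1, 2, 4, 2, 1]
--     >>> add_this_many(1, 5, s)
--     >>> s
--     [1, 2, 4, 2, 1, 5, 5]
--     >>> add_this_many(2, 2, s)
--     >>> s
--     [1, 2, 4, 2, 1, 5, 5, 2, 2]
--     """
--     # check the number of times x occurs in s
--     # append el at the respective number times in s
--     # return s
--     num = 0
--     for i in range(len(s)):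
--         if s[i] == x:
--             num += 1
--     for i in range(1, num + 1):
--         s.append(el)
--
--     return s
-- ===== SOURCE B (Python) =====
-- def add_this_many(x, el, s):
--     # Single pass: iterate over a snapshot of s and append el immediately on
--     # each match; no counter and no second loop. Mutates s in place like A.
--     for item in list(s):
--         if item == x:
--             s.append(el)
--     return s
-- ===== Notes on version B (the rewrite author's own statement) =====
-- stated objective: simpler
-- what changed: Fuses A's two staged passes (count occurrences, then a range loop of appends) into one pass over a snapshot of s that appends el immediately on each match, eliminating the num counter and the second loop.
import Mathlib
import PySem

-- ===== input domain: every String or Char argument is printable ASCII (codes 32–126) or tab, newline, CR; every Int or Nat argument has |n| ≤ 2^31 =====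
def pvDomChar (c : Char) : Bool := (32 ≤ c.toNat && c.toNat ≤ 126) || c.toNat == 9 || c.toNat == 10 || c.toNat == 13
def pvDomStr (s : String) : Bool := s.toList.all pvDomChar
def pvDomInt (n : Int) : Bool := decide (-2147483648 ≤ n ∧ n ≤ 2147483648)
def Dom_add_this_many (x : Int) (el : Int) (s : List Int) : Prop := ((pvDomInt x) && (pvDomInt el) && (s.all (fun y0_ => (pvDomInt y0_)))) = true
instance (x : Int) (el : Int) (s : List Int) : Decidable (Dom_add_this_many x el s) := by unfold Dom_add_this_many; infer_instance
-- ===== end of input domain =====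

-- ===== PORT A =====
-- B fuses A's count-then-append passes into one pass over a snapshot of s that
-- appends immediately on each match; both mutate s in Python, the equivalence
-- proved here is about the returned value.
def add_this_many (x : Int) (el : Int) (s : List Int) : List Int :=
  let num : Int := (PySem.List.pyRange 0 (PySem.List.len s) 1).foldl
    (fun num i => if PySem.List.pyGetD s i 0 == x then num + 1 else num) 0
  (PySem.List.pyRange 1 (num + 1) 1).foldl (fun acc _ => acc ++ [el]) s

-- ===== PORT B =====
-- for item in list(s): if item == x: s.append(el)  — fold over the snapshot,
-- the accumulator is the mutated s.
def add_this_many_alt (x : Int) (el : Int) (s : List Int) : List Int :=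
  s.foldl (fun acc item => if item == x then acc ++ [el] else acc) s

-- ===== PRECONDITION & SPEC =====
def Spec_add_this_many (x : Int) (el : Int) (s : List Int) (out : List Int) : Prop := out = add_this_many_alt x el s
instance (x : Int) (el : Int) (s : List Int) (out : List Int) : Decidable (Spec_add_this_many x el s out) := by unfold Spec_add_this_many; infer_instance

-- ===== CLAIM (what is proved, stated in full; the proofs are below) =====
def Claim_equal_add_this_many : Prop := ∀ (x : Int) (el : Int) (s : List Int), Dom_add_this_many x el s → Spec_add_this_many x el s (add_this_many x el s)

-- ===== LEMMAS AND PROOFS =====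
-- A's append loop over range(1, n+1) appends n copies of el.
theorem foldl_range_append (el : Int) (n : Nat) :
    ∀ (a : Int) (s : List Int),
      (PySem.List.pyRange a (a + n) 1).foldl (fun acc _ => acc ++ [el]) s
        = s ++ List.replicate n el := by
  induction n with
  | zero => intro a s; simp [PySem.List.pyRange_one_eq_nil (le_refl a)]
  | succ m ih =>
    intro a s
    have h : (a : Int) + (m + 1 : Nat) = (a + m) + 1 := by push_cast; ring
    rw [h, PySem.List.pyRange_one_succ_right (by omega), List.foldl_append]
    rw [ih a s]
    simp [List.replicate_succ']

-- A's counting loop computes s.count x.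
theorem count_loop (x : Int) (s : List Int) :
    (PySem.List.pyRange 0 (PySem.List.len s) 1).foldl
      (fun num i => if PySem.List.pyGetD s i 0 == x then num + 1 else num) 0
      = (s.count x : Int) := by
  have h2 : (PySem.List.pyRange 0 (PySem.List.len s) 1).foldl
      (fun num i => if PySem.List.pyGetD s i 0 == x then num + 1 else num) 0
    = ((PySem.List.pyRange 0 (PySem.List.len s) 1).map (fun i => PySem.List.pyGetD s i 0)).foldl
      (fun num v => if v == x then num + 1 else num) (0 : Int) := by
    rw [List.foldl_map]
  refine h2.trans ?_
  rw [PySem.List.map_pyGetD_pyRange_zero, PySem.List.foldl_beq_add_one]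
  ring

-- B's fused pass over the snapshot t appends one el per match of t.
theorem snapshot_fold (x el : Int) :
    ∀ (t acc : List Int),
      t.foldl (fun acc item => if item == x then acc ++ [el] else acc) acc
        = acc ++ List.replicate (t.count x) el := by
  intro t
  induction t with
  | nil => intro acc; simp
  | cons h tl ih =>
    intro acc
    simp only [List.foldl_cons, List.count_cons]
    by_cases hx : h = x
    · rw [if_pos (by simp [hx]), ih]
      simp [hx, ← List.replicate_succ, ← List.replicate_succ']
    · rw [if_neg (by simp [hx]), ih]
      simp [hx]

-- ===== VERDICT (by name: the statement is the Claim_ definition above) =====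
theorem add_this_many_spec : Claim_equal_add_this_many := by
  intro x el s _
  unfold Spec_add_this_many add_this_many add_this_many_alt
  simp only [count_loop, snapshot_fold]
  have h : ((s.count x : Int)) + 1 = 1 + (s.count x : Nat) := by omega
  rw [h, foldl_range_append el (s.count x) 1 s]
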